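-- pv_equiv track=rewrite | github.com/ZoloAi/ZoloMedia | zlsp/zlsp/core/parser/parser_modules/multiline_collectors.py | collect_pipe_multiline
-- ===== SOURCE A (Python) =====
-- from typing import Tuple, List, Optional
--
-- YAML_LINE_BREAK = '\x1F'
--
-- def collect_pipe_multiline(
--     lines: list[str],
--     start_idx: int,
--     parent_indent: int,
--     parent_key: Optional[str] = None
-- ) -> Tuple[str, int]:
--     """
--     Collect multi-line string content after pipe | marker.
--
--     Args:
--         lines: All lines
--         start_idx: Index to start collecting from
--         parent_indent: Indentation level of the parent key
--         parent_key: The key name (used for semantic joining)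
--
--     Returns:
--         Tuple of (multiline_string, lines_consumed)
--     """
--     collected = []
--     base_indent = None
--     lines_consumed = 0
--
--     for i in range(start_idx, len(lines)):
--         line = lines[i]
--         line_indent = len(line) - len(line.lstrip())
--
--         # If we hit a line at or less than parent indent, we're done
--         if line and line_indent <= parent_indent:
--             break
--
--         # Set base indent from first content line
--         if base_indent is None and line.strip():
--             base_indent = line_indent
--
--         # Collect line, stripping base indentation
--         if base_indent is not None:
--             if line_indent >= base_indent:
--                 # Strip base indent, keep relative indent
--                 relative_line = line[base_indent:] if len(line) >= base_indent else line.strip()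
--                 collected.append(relative_line)
--             else:
--                 collected.append(line.strip())
--         else:
--             collected.append(line.strip())
--
--         lines_consumed += 1
--
--     # Determine join character based on parent key
--     clean_key = parent_key.split('__dup')[0].lower() if parent_key else None
--
--     if clean_key == 'ztext':
--         join_char = ' '
--     elif clean_key == 'zmd':
--         join_char = YAML_LINE_BREAK
--     else:
--         join_char = '\n'
--
--     return join_char.join(collected), lines_consumed
-- ===== SOURCE B (Python) =====
-- YAML_LINE_BREAK = '\x1F'
--
--
-- def collect_pipe_multiline(lines, start_idx, parent_indent, parent_key=None):
--     # Pass 1: take the block's raw lines (stop at a non-empty line indented <= parent).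
--     raw = []
--     i = start_idx
--     while i < len(lines):
--         line = lines[i]
--         if line and len(line) - len(line.lstrip()) <= parent_indent:
--             break
--         raw.append(line)
--         i += 1
--
--     # Pass 2: the base indent is the indent of the first non-blank raw line.
--     k = next((j for j, l in enumerate(raw) if l.strip()), None)
--
--     # Pass 3: clean every line in one go.
--     if k is None:
--         cleaned = [l.strip() for l in raw]
--     else:
--         base = len(raw[k]) - len(raw[k].lstrip())
--         cleaned = [l.strip() for l in raw[:k]] + [
--             l[base:] if len(l) - len(l.lstrip()) >= base else l.strip()
--             for l in raw[k:]
--         ]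
--
--     key = parent_key.split('__dup')[0].lower() if parent_key else None
--     join_char = ' ' if key == 'ztext' else YAML_LINE_BREAK if key == 'zmd' else '\n'
--     return join_char.join(cleaned), len(raw)
-- ===== Notes on version B (the rewrite author's own statement) =====
-- stated objective: simpler
-- what changed: A's single stateful loop that decides base_indent mid-iteration and cleans each line immediately is replaced by three separate passes: collect the raw block lines, locate the first non-blank line to fix the base indent once, then clean all lines with one fixed rule (the redundant len(line)>=base check drops out).
import Mathlib
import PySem

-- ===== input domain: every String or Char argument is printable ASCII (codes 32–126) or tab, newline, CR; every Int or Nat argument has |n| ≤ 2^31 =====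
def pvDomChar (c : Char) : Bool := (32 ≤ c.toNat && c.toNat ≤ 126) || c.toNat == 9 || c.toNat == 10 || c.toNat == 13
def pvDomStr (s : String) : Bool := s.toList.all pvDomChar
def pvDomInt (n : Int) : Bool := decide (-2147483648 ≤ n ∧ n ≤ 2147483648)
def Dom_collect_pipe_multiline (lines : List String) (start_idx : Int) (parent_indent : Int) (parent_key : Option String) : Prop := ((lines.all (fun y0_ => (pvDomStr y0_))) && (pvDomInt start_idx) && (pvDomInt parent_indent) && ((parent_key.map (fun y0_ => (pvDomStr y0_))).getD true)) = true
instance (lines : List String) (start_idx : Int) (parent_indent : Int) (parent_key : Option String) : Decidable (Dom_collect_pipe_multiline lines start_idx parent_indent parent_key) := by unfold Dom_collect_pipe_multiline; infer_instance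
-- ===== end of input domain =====

-- B replaces A's single stateful loop (mutable base_indent decided mid-loop) by three passes —
-- collect the raw block lines, find the base indent once, then clean every line by one fixed rule;
-- objective: simpler. Return values are proved equal on Pre_ (A and B both mutate nothing).

-- ===== PORT A =====
-- len(line) - len(line.lstrip())  (appears verbatim in both Pythons)
def pvIndent (line : String) : Int :=
  PySem.Str.len line - PySem.Str.len (PySem.Str.lstrip line)

-- A's per-line collection step, given the current base_indent
def pvItemA (base : Option Int) (line : String) : String :=
  match base with
  | some b =>
    if pvIndent line ≥ b then
      if PySem.Str.len line ≥ b then PySem.Str.slice line (some b) none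
      else PySem.Str.strip line
    else PySem.Str.strip line
  | none => PySem.Str.strip line

-- join_char from parent_key (the same trailing code in both Pythons)
def pvJoinChar (parent_key : Option String) : String :=
  let clean_key : Option String :=
    match parent_key with
    | some k =>
      if k = "" then none
      else some (PySem.Str.lower (((PySem.Str.split? k "__dup").getD []).headD ""))
    | none => none
  if clean_key = some "ztext" then " "
  else if clean_key = some "zmd" then "\u001F"
  else "\n"

-- A's for-loop over range(start_idx, len(lines)) with its three accumulators; early return = break
def pvALoop (lines : List String) (parent_indent : Int) :
    List Int → List String → Option Int → Int → List String × Int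
  | [], collected, _, consumed => (collected, consumed)
  | i :: rest, collected, base, consumed =>
    match PySem.List.pyGet? lines i with
    | none => (collected, consumed)  -- lines[i] raises IndexError; outside Pre_
    | some line =>
      if line ≠ "" ∧ pvIndent line ≤ parent_indent then (collected, consumed)
      else
        let base' := if base = none ∧ PySem.Str.strip line ≠ "" then some (pvIndent line) else base
        pvALoop lines parent_indent rest (collected ++ [pvItemA base' line]) base' (consumed + 1)

def collect_pipe_multiline (lines : List String) (start_idx : Int) (parent_indent : Int) (parent_key : Option String) : String × Int :=
  let r := pvALoop lines parent_indent (PySem.List.pyRange start_idx (lines.length : Int) 1) [] none 0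
  (PySem.Str.join (pvJoinChar parent_key) r.1, r.2)

-- ===== PORT B =====
-- B pass 1: the while-loop collecting the raw block lines
def pvBRaw (lines : List String) (parent_indent : Int) (i : Int) : List String :=
  if h : i < (lines.length : Int) then
    match PySem.List.pyGet? lines i with
    | none => []  -- lines[i] raises IndexError; outside Pre_
    | some line =>
      if line ≠ "" ∧ pvIndent line ≤ parent_indent then []
      else line :: pvBRaw lines parent_indent (i + 1)
  else []
termination_by ((lines.length : Int) - i).toNat
decreasing_by omega

-- B's one cleaning rule once the base indent is known
def pvRuleB (b : Int) (line : String) : String :=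
  if pvIndent line ≥ b then PySem.Str.slice line (some b) none
  else PySem.Str.strip line

-- B passes 2+3: find the first non-blank raw line, then clean in one go
def pvCleanB (raw : List String) : List String :=
  match raw.findIdx? (fun l => PySem.Str.strip l != "") with
  | none => raw.map PySem.Str.strip
  | some k =>
    (raw.take k).map PySem.Str.strip ++ (raw.drop k).map (pvRuleB (pvIndent (raw.getD k "")))

def collect_pipe_multiline_alt (lines : List String) (start_idx : Int) (parent_indent : Int) (parent_key : Option String) : String × Int :=
  let raw := pvBRaw lines parent_indent start_idx
  (PySem.Str.join (pvJoinChar parent_key) (pvCleanB raw), (raw.length : Int))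

-- ===== PRECONDITION & SPEC =====
-- Pre_ excludes exactly start_idx < -len(lines): there both Pythons raise IndexError on lines[start_idx].
def Pre_collect_pipe_multiline (lines : List String) (start_idx : Int) (parent_indent : Int) (parent_key : Option String) : Prop :=
  -(lines.length : Int) ≤ start_idx
instance (lines : List String) (start_idx : Int) (parent_indent : Int) (parent_key : Option String) : Decidable (Pre_collect_pipe_multiline lines start_idx parent_indent parent_key) := by unfold Pre_collect_pipe_multiline; infer_instance

def pvWitness_collect_pipe_multiline : List String × Int × Int × Option String :=
  (["  a", "   b"], 0, 0, some "ztext")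

def Spec_collect_pipe_multiline (lines : List String) (start_idx : Int) (parent_indent : Int) (parent_key : Option String) (out : String × Int) : Prop := out = collect_pipe_multiline_alt lines start_idx parent_indent parent_key
instance (lines : List String) (start_idx : Int) (parent_indent : Int) (parent_key : Option String) (out : String × Int) : Decidable (Spec_collect_pipe_multiline lines start_idx parent_indent parent_key out) := by unfold Spec_collect_pipe_multiline; infer_instance

-- ===== CLAIM (what is proved, stated in full; the proofs are below) =====
def Claim_equal_collect_pipe_multiline : Prop := ∀ (lines : List String) (start_idx : Int) (parent_indent : Int) (parent_key : Option String), Dom_collect_pipe_multiline lines start_idx parent_indent parent_key → Pre_collect_pipe_multiline lines start_idx parent_indent parent_key → Spec_collect_pipe_multiline lines start_idx parent_indent parent_key (collect_pipe_multiline lines start_idx parent_indent parent_key)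

-- ===== LEMMAS AND PROOFS =====

-- A's collection phase as a function of the raw line sequence it visits
def pvCleanA (base : Option Int) : List String → List String
  | [] => []
  | l :: ls =>
    let base' := if base = none ∧ PySem.Str.strip l ≠ "" then some (pvIndent l) else base
    pvItemA base' l :: pvCleanA base' ls

lemma pvIndent_le_len (l : String) : pvIndent l ≤ PySem.Str.len l := by
  have h : (0 : Int) ≤ PySem.Str.len (PySem.Str.lstrip l) := by
    simp [PySem.Str.len_eq]
  unfold pvIndent
  omega

-- A's redundant 'len(line) >= base_indent' guard never fires: indent ≥ b already gives len ≥ b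
lemma pvItemA_some (b : Int) (l : String) : pvItemA (some b) l = pvRuleB b l := by
  by_cases h : pvIndent l ≥ b
  · have hle := pvIndent_le_len l
    simp [PySem.Str.len_eq] at hle
    simp [pvItemA, pvRuleB, h]
    omega
  · simp [pvItemA, pvRuleB, h]

lemma pvCleanA_some (b : Int) (xs : List String) :
    pvCleanA (some b) xs = xs.map (pvRuleB b) := by
  induction xs with
  | nil => rfl
  | cons l ls ih => simp [pvCleanA, pvItemA_some, ih]

lemma pvCleanB_cons_blank (l : String) (ls : List String) (hs : PySem.Str.strip l = "") :
    pvCleanB (l :: ls) = PySem.Str.strip l :: pvCleanB ls := by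
  unfold pvCleanB
  rw [List.findIdx?_cons]
  cases hfi : List.findIdx? (fun x => PySem.Str.strip x != "") ls with
  | none => simp [hs]
  | some k => simp [hs]

lemma pvCleanB_cons_content (l : String) (ls : List String) (hs : PySem.Str.strip l ≠ "") :
    pvCleanB (l :: ls) = (l :: ls).map (pvRuleB (pvIndent l)) := by
  unfold pvCleanB
  rw [List.findIdx?_cons]
  simp [hs]

lemma pvCleanA_none (raw : List String) : pvCleanA none raw = pvCleanB raw := by
  induction raw with
  | nil => rfl
  | cons l ls ih =>
    by_cases hs : PySem.Str.strip l = ""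
    · rw [pvCleanB_cons_blank l ls hs]
      simp [pvCleanA, pvItemA, hs, ih]
    · rw [pvCleanB_cons_content l ls hs]
      simp [pvCleanA, hs, pvItemA_some, pvCleanA_some]

-- The heart: A's interleaved loop equals (pvCleanA of B's raw lines, their count)
lemma pvALoop_eq (lines : List String) (pind : Int) :
    ∀ (n : Nat) (i : Int), ((lines.length : Int) - i).toNat = n →
    ∀ (coll : List String) (base : Option Int) (cons : Int),
      pvALoop lines pind (PySem.List.pyRange i (lines.length : Int) 1) coll base cons
        = (coll ++ pvCleanA base (pvBRaw lines pind i),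
           cons + ((pvBRaw lines pind i).length : Int)) := by
  intro n
  induction n with
  | zero =>
    intro i hn coll base cons
    have h : ¬ i < (lines.length : Int) := by omega
    have hraw : pvBRaw lines pind i = [] := by rw [pvBRaw]; simp [h]
    rw [PySem.List.pyRange_one_eq_nil (by omega), hraw]
    simp [pvALoop, pvCleanA]
  | succ n ih =>
    intro i hn coll base cons
    by_cases h : i < (lines.length : Int)
    · rw [PySem.List.pyRange_one_cons h]
      cases hg : PySem.List.pyGet? lines i with
      | none =>
        have hraw : pvBRaw lines pind i = [] := by rw [pvBRaw]; simp [h, hg]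
        rw [hraw]
        simp [pvALoop, hg, pvCleanA]
      | some line =>
        by_cases hb : line ≠ "" ∧ pvIndent line ≤ pind
        · have hraw : pvBRaw lines pind i = [] := by
            rw [pvBRaw]; simp only [dif_pos h, hg]; rw [if_pos hb]
          rw [hraw]
          simp only [pvALoop, hg]
          rw [if_pos hb]
          simp [pvCleanA]
        · have hraw : pvBRaw lines pind i = line :: pvBRaw lines pind (i + 1) := by
            rw [pvBRaw]; simp only [dif_pos h, hg]; rw [if_neg hb]
          rw [hraw]
          simp only [pvALoop, hg]
          rw [if_neg hb]
          rw [ih (i + 1) (by omega)]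
          simp [pvCleanA, Prod.ext_iff]
          omega
    · exact absurd (by omega : ((lines.length : Int) - i).toNat = 0) (by omega)

-- ===== VERDICT (by name: the statement is the Claim_ definition above) =====
theorem collect_pipe_multiline_spec : Claim_equal_collect_pipe_multiline := by
  intro lines start_idx parent_indent parent_key _hdom _hpre
  unfold Spec_collect_pipe_multiline collect_pipe_multiline collect_pipe_multiline_alt
  rw [pvALoop_eq lines parent_indent (((lines.length : Int) - start_idx).toNat) start_idx rfl]
  rw [pvCleanA_none]
  simp
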